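-- pv_equiv track=rewrite | github.com/smartass-4ever/Eros.v2 | cognitive_orchestrator.py | _detect_social_context
-- ===== SOURCE A (Python) =====
-- from typing import Dict, List, Tuple, Any, Optional
--
-- def _detect_social_context(
--
--     user_input: str,
--     conversation_history: List
-- ) -> str:
--     """Detect the social context of the conversation"""
--
--     user_lower = user_input.lower() if user_input else ""
--
--     serious_indicators = ['help', 'need', 'struggling', 'worried', 'scared', 'hurts',
--                          'depressed', 'anxious', 'lost', 'confused', 'don\'t know what to do']
--
--     casual_indicators = ['hey', 'hi', 'what\'s up', 'how are you', 'bored', 'lol',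
--                         'haha', 'sup', 'yo', 'wassup', 'wyd']
--
--     deep_indicators = ['meaning', 'purpose', 'believe', 'think about', 'philosophy',
--                       'death', 'life', 'love', 'existence', 'consciousness']
--
--     flirty_indicators = ['cute', 'hot', 'attractive', 'handsome', 'beautiful',
--                         'miss you', 'thinking about you', 'like you']
--
--     serious_count = sum(1 for ind in serious_indicators if ind in user_lower)
--     casual_count = sum(1 for ind in casual_indicators if ind in user_lower)
--     deep_count = sum(1 for ind in deep_indicators if ind in user_lower)
--     flirty_count = sum(1 for ind in flirty_indicators if ind in user_lower)
--
--     if serious_count >= 2: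
--         return 'serious'
--     elif deep_count >= 1:
--         return 'philosophical'
--     elif flirty_count >= 1:
--         return 'flirty'
--     elif casual_count >= 1:
--         return 'casual'
--
--     if len(conversation_history) > 10:
--         return 'ongoing_deep'
--
--     return 'casual'
-- ===== SOURCE B (Python) =====
-- def _matched_keywords(u, kws):
--     """Scan u left-to-right; at each position collect the keywords starting there."""
--     found = set()
--     for pos in range(len(u) + 1):
--         for kw in kws:
--             if u.startswith(kw, pos):
--                 found.add(kw)
--     return found
--
--
-- def _detect_social_context(user_input, conversation_history):
--     """Text-driven re-implementation: one positional scan per category collects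
--     the set of matched keywords; the decision is read off the set sizes."""
--     u = user_input.lower() if user_input else ""
--     serious = _matched_keywords(u, ['help', 'need', 'struggling', 'worried',
--                                     'scared', 'hurts', 'depressed', 'anxious',
--                                     'lost', 'confused', 'don\'t know what to do'])
--     deep = _matched_keywords(u, ['meaning', 'purpose', 'believe', 'think about',
--                                  'philosophy', 'death', 'life', 'love',
--                                  'existence', 'consciousness'])
--     flirty = _matched_keywords(u, ['cute', 'hot', 'attractive', 'handsome',
--                                    'beautiful', 'miss you', 'thinking about you',
--                                    'like you'])
--     casual = _matched_keywords(u, ['hey', 'hi', 'what\'s up', 'how are you',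
--                                    'bored', 'lol', 'haha', 'sup', 'yo',
--                                    'wassup', 'wyd'])
--     if len(serious) >= 2:
--         return 'serious'
--     if deep:
--         return 'philosophical'
--     if flirty:
--         return 'flirty'
--     if casual:
--         return 'casual'
--     return 'ongoing_deep' if len(conversation_history) > 10 else 'casual'
-- ===== Notes on version B (the rewrite author's own statement) =====
-- stated objective: alternative
-- what changed: Replaces A's per-keyword substring-membership counts ('ind in user_lower' summed per category) with a text-driven positional scan: for each category, walk the positions of the lowered text once, collect the set of keywords that start at some position, and read the priority decision off the set sizes.
import Mathlib
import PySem

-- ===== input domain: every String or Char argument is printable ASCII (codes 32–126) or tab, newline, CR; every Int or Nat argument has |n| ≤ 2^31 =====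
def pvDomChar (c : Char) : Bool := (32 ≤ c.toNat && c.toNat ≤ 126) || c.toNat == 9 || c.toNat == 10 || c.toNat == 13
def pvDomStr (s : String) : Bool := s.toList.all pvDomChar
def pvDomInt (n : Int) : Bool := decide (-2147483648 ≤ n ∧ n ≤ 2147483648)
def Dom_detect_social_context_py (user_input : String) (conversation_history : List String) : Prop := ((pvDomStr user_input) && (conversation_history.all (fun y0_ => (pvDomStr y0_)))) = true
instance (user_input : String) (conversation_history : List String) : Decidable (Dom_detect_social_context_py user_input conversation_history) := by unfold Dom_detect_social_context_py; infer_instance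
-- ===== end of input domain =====

-- B replaces A's per-keyword substring-membership counts with a text-driven positional
-- scan collecting the set of matched keywords per category; objective: alternative.

-- ===== PORT A =====
-- sum(1 for ind in inds if ind in u)
def pvASum (inds : List String) (u : String) : Nat :=
  inds.foldl (fun acc ind => acc + (if PySem.Str.isIn ind u then 1 else 0)) 0

def detect_social_context_py (user_input : String) (conversation_history : List String) : String :=
  let user_lower := if user_input ≠ "" then PySem.Str.lower user_input else ""
  let serious_indicators := ["help", "need", "struggling", "worried", "scared", "hurts",
                             "depressed", "anxious", "lost", "confused", "don't know what to do"]
  let casual_indicators := ["hey", "hi", "what's up", "how are you", "bored", "lol",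
                            "haha", "sup", "yo", "wassup", "wyd"]
  let deep_indicators := ["meaning", "purpose", "believe", "think about", "philosophy",
                          "death", "life", "love", "existence", "consciousness"]
  let flirty_indicators := ["cute", "hot", "attractive", "handsome", "beautiful",
                            "miss you", "thinking about you", "like you"]
  let serious_count := pvASum serious_indicators user_lower
  let casual_count := pvASum casual_indicators user_lower
  let deep_count := pvASum deep_indicators user_lower
  let flirty_count := pvASum flirty_indicators user_lower
  if serious_count ≥ 2 then "serious"
  else if deep_count ≥ 1 then "philosophical"
  else if flirty_count ≥ 1 then "flirty"
  else if casual_count ≥ 1 then "casual"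
  else if conversation_history.length > 10 then "ongoing_deep"
  else "casual"

-- ===== PORT B =====
-- _matched_keywords: for pos in range(len(u)+1): for kw in kws: if u.startswith(kw, pos): found.add(kw)
def pvMatched (u : String) (kws : List String) : PySem.Set String :=
  (List.range (u.length + 1)).foldl
    (fun (found : PySem.Set String) (pos : Nat) =>
      -- u.startswith(kw, pos): exact for 0 ≤ pos — Python's startswith with a start
      -- argument is the prefix test on u[pos:], ported as startswith (slice u pos none) kw
      kws.foldl (fun found kw =>
        if PySem.Str.startswith (PySem.Str.slice u (some (pos : Int)) none) kw
        then PySem.Set.add found kw else found) found)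
    (PySem.Set.ofList [])

def detect_social_context_py_alt (user_input : String) (conversation_history : List String) : String :=
  let u := if user_input ≠ "" then PySem.Str.lower user_input else ""
  let serious := pvMatched u ["help", "need", "struggling", "worried", "scared", "hurts",
                              "depressed", "anxious", "lost", "confused", "don't know what to do"]
  let deep := pvMatched u ["meaning", "purpose", "believe", "think about", "philosophy",
                           "death", "life", "love", "existence", "consciousness"]
  let flirty := pvMatched u ["cute", "hot", "attractive", "handsome", "beautiful",
                             "miss you", "thinking about you", "like you"]
  let casual := pvMatched u ["hey", "hi", "what's up", "how are you", "bored", "lol",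
                             "haha", "sup", "yo", "wassup", "wyd"]
  if PySem.Set.len serious ≥ 2 then "serious"
  else if PySem.Set.len deep ≠ 0 then "philosophical"   -- 'if deep:' = set nonempty
  else if PySem.Set.len flirty ≠ 0 then "flirty"
  else if PySem.Set.len casual ≠ 0 then "casual"
  else if conversation_history.length > 10 then "ongoing_deep"
  else "casual"

-- ===== PRECONDITION & SPEC =====
def Spec_detect_social_context_py (user_input : String) (conversation_history : List String) (out : String) : Prop := out = detect_social_context_py_alt user_input conversation_history
instance (user_input : String) (conversation_history : List String) (out : String) : Decidable (Spec_detect_social_context_py user_input conversation_history out) := by unfold Spec_detect_social_context_py; infer_instance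

-- ===== CLAIM (what is proved, stated in full; the proofs are below) =====
def Claim_equal_detect_social_context_py : Prop := ∀ (user_input : String) (conversation_history : List String), Dom_detect_social_context_py user_input conversation_history → Spec_detect_social_context_py user_input conversation_history (detect_social_context_py user_input conversation_history)

-- ===== LEMMAS AND PROOFS =====

-- A's 0/1-sum is countP
theorem pvASum_aux (inds : List String) (u : String) : ∀ a : Nat,
    inds.foldl (fun acc ind => acc + (if PySem.Str.isIn ind u then 1 else 0)) a
      = a + inds.countP (fun ind => PySem.Str.isIn ind u) := by
  induction inds with
  | nil => intro a; simp
  | cons h t ih =>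
    intro a
    simp only [List.foldl_cons, List.countP_cons, ih]
    rcases Bool.eq_false_or_eq_true (PySem.Str.isIn h u) with hc | hc
    · rw [hc]; simp; try omega
    · rw [hc]; simp; try omega

-- membership in the inner fold (over keywords at one position)
theorem pvMemInner (p : String → Bool) (kws : List String) :
    ∀ (acc : PySem.Set String) (y : String),
    (y ∈ kws.foldl (fun s kw => if p kw then PySem.Set.add s kw else s) acc) ↔
      (y ∈ acc ∨ (y ∈ kws ∧ p y = true)) := by
  induction kws with
  | nil => intro acc y; simp
  | cons h t ih =>
    intro acc y
    simp only [List.foldl_cons, List.mem_cons]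
    by_cases hp : p h = true
    · rw [if_pos hp, ih, PySem.Set.mem_add]
      constructor
      · rintro (⟨hy | rfl⟩ | ⟨hy, hpy⟩)
        · exact Or.inl hy
        · exact Or.inr ⟨Or.inl rfl, hp⟩
        · exact Or.inr ⟨Or.inr hy, hpy⟩
      · rintro (hy | ⟨rfl | hy, hpy⟩)
        · exact Or.inl (Or.inl hy)
        · exact Or.inl (Or.inr rfl)
        · exact Or.inr ⟨hy, hpy⟩
    · rw [if_neg hp, ih]
      constructor
      · rintro (hy | ⟨hy, hpy⟩)
        · exact Or.inl hy
        · exact Or.inr ⟨Or.inr hy, hpy⟩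
      · rintro (hy | ⟨rfl | hy, hpy⟩)
        · exact Or.inl hy
        · exact absurd hpy hp
        · exact Or.inr ⟨hy, hpy⟩

-- the inner fold preserves Nodup
theorem pvNodupInner (p : String → Bool) (kws : List String) :
    ∀ (acc : PySem.Set String), acc.Nodup →
    (kws.foldl (fun s kw => if p kw then PySem.Set.add s kw else s) acc).Nodup := by
  induction kws with
  | nil => intro acc h; simpa using h
  | cons h t ih =>
    intro acc hacc
    simp only [List.foldl_cons]
    by_cases hp : p h = true
    · rw [if_pos hp]; exact ih _ (PySem.Set.nodup_add acc h hacc)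
    · rw [if_neg hp]; exact ih _ hacc

-- membership in the outer fold (over positions)
theorem pvMemOuter (q : Nat → String → Bool) (kws : List String) (ps : List Nat) :
    ∀ (acc : PySem.Set String) (y : String),
    (y ∈ ps.foldl (fun s pos =>
        kws.foldl (fun s kw => if q pos kw then PySem.Set.add s kw else s) s) acc) ↔
      (y ∈ acc ∨ (y ∈ kws ∧ ∃ pos ∈ ps, q pos y = true)) := by
  induction ps with
  | nil => intro acc y; simp
  | cons h t ih =>
    intro acc y
    simp only [List.foldl_cons, ih, pvMemInner, List.mem_cons]
    constructor
    · rintro ((hy | ⟨hk, hq⟩) | ⟨hk, pos, hpos, hq⟩)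
      · exact Or.inl hy
      · exact Or.inr ⟨hk, h, Or.inl rfl, hq⟩
      · exact Or.inr ⟨hk, pos, Or.inr hpos, hq⟩
    · rintro (hy | ⟨hk, pos, (rfl | hpos), hq⟩)
      · exact Or.inl (Or.inl hy)
      · exact Or.inl (Or.inr ⟨hk, hq⟩)
      · exact Or.inr ⟨hk, pos, hpos, hq⟩

theorem pvNodupOuter (q : Nat → String → Bool) (kws : List String) (ps : List Nat) :
    ∀ (acc : PySem.Set String), acc.Nodup →
    (ps.foldl (fun s pos =>
        kws.foldl (fun s kw => if q pos kw then PySem.Set.add s kw else s) s) acc).Nodup := by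
  induction ps with
  | nil => intro acc h; simpa using h
  | cons h t ih =>
    intro acc hacc
    exact ih _ (pvNodupInner _ kws acc hacc)

-- a position where kw starts exists iff kw occurs in u
theorem pvExistsPos (u kw : String) :
    (∃ pos ∈ List.range (u.length + 1),
      PySem.Str.startswith (PySem.Str.slice u (some (pos : Int)) none) kw = true) ↔
    PySem.Str.isIn kw u = true := by
  have hsl : ∀ pos : Nat,
      (PySem.Str.slice u (some (pos : Int)) none).toList = u.toList.drop pos := by
    intro pos; simp [PySem.List.slice_from_natCast]
  have hlen : u.toList.length = u.length := by simp
  constructor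
  · rintro ⟨pos, _, hq⟩
    rw [PySem.Str.startswith_eq, hsl, PySem.Chars.startswith_iff] at hq
    rw [PySem.Str.isIn_eq, ← PySem.Chars.exists_prefix_drop_iff_isIn]
    exact ⟨pos, hq⟩
  · intro hin
    rw [PySem.Str.isIn_eq, ← PySem.Chars.exists_prefix_drop_iff_isIn] at hin
    obtain ⟨j, hj⟩ := hin
    by_cases hle : j ≤ u.toList.length
    · refine ⟨j, by simp only [List.mem_range]; omega, ?_⟩
      rw [PySem.Str.startswith_eq, hsl, PySem.Chars.startswith_iff]
      exact hj
    · -- j past the end: kw must be empty, so it also starts at position len(u)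
      have hnil : u.toList.drop j = [] := List.drop_eq_nil_of_le (by omega)
      rw [hnil] at hj
      have hkw : kw.toList = [] := List.prefix_nil.mp hj
      refine ⟨u.toList.length, by simp only [List.mem_range]; omega, ?_⟩
      rw [PySem.Str.startswith_eq, hsl, PySem.Chars.startswith_iff, hkw]
      simp

-- a keyword is in the matched set iff it is a listed keyword occurring in u
theorem pvMemMatched (u kw : String) (kws : List String) :
    kw ∈ pvMatched u kws ↔ (kw ∈ kws ∧ PySem.Str.isIn kw u = true) := by
  unfold pvMatched
  rw [pvMemOuter (fun pos k =>
        PySem.Str.startswith (PySem.Str.slice u (some (pos : Int)) none) k) kws]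
  rw [← pvExistsPos u kw]
  simp [PySem.Set.ofList_nil]

theorem pvMatchedNodup (u : String) (kws : List String) : (pvMatched u kws).Nodup := by
  unfold pvMatched
  exact pvNodupOuter _ kws _ _ (by simp [PySem.Set.ofList])

-- the matched set's size is exactly A's count
theorem pvLenMatched (u : String) (kws : List String) (hnd : kws.Nodup) :
    PySem.Set.len (pvMatched u kws) = pvASum kws u := by
  have hperm : (pvMatched u kws).Perm (kws.filter (fun kw => PySem.Str.isIn kw u)) := by
    rw [List.perm_ext_iff_of_nodup (pvMatchedNodup u kws) (hnd.filter _)]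
    intro a
    rw [pvMemMatched, List.mem_filter]
  have hlen : (pvMatched u kws).length = (kws.filter (fun kw => PySem.Str.isIn kw u)).length :=
    hperm.length_eq
  unfold pvASum
  rw [pvASum_aux, List.countP_eq_length_filter]
  simpa [PySem.Set.len] using hlen

-- ===== VERDICT (by name: the statement is the Claim_ definition above) =====
theorem detect_social_context_py_spec : Claim_equal_detect_social_context_py := by
  intro user_input conversation_history _
  unfold Spec_detect_social_context_py
  simp only [detect_social_context_py, detect_social_context_py_alt]
  rw [pvLenMatched _ _ (by decide), pvLenMatched _ _ (by decide),
      pvLenMatched _ _ (by decide), pvLenMatched _ _ (by decide)]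
  split_ifs <;> first | rfl | omega
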